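-- pv_equiv track=rewrite | github.com/kapilw25/factorjepa | src/legacy/utils/grid.py | path_to_positions
-- ===== SOURCE A (Python) =====
-- from typing import List, Tuple, Dict, Set, Optional
--
-- DIRECTIONS = {
--     "North": (-1, 0),
--     "South": (1, 0),
--     "East": (0, 1),
--     "West": (0, -1)
-- }
--
-- def path_to_positions(
--     start: Tuple[int, int],
--     path: List[str]
-- ) -> List[Tuple[int, int]]:
--     """Convert a path (list of directions) to a list of positions."""
--     positions = [start]
--     current = start
--
--     for direction in path:
--         if direction in DIRECTIONS:
--             dr, dc = DIRECTIONS[direction]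
--             current = (current[0] + dr, current[1] + dc)
--             positions.append(current)
--
--     return positions
-- ===== SOURCE B (Python) =====
-- from typing import List, Tuple
--
-- DIRECTIONS = {
--     "North": (-1, 0),
--     "South": (1, 0),
--     "East": (0, 1),
--     "West": (0, -1)
-- }
--
-- def _scan(pos, deltas):
--     """Prefix-scan: positions reached from pos by applying deltas in order."""
--     if not deltas:
--         return [pos]
--     dr, dc = deltas[0]
--     return [pos] + _scan((pos[0] + dr, pos[1] + dc), deltas[1:])
--
-- def path_to_positions(
--     start: Tuple[int, int],
--     path: List[str]
-- ) -> List[Tuple[int, int]]: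
--     """Convert a path (list of directions) to a list of positions."""
--     deltas = [DIRECTIONS[d] for d in path if d in DIRECTIONS]
--     return _scan(start, deltas)
-- ===== Notes on version B (the rewrite author's own statement) =====
-- stated objective: alternative
-- what changed: Replaces the imperative loop maintaining `current` and appending to `positions` with a derive-then-scan decomposition: first a comprehension maps valid directions to deltas, then a recursive prefix-scan builds the position list.
import Mathlib
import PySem

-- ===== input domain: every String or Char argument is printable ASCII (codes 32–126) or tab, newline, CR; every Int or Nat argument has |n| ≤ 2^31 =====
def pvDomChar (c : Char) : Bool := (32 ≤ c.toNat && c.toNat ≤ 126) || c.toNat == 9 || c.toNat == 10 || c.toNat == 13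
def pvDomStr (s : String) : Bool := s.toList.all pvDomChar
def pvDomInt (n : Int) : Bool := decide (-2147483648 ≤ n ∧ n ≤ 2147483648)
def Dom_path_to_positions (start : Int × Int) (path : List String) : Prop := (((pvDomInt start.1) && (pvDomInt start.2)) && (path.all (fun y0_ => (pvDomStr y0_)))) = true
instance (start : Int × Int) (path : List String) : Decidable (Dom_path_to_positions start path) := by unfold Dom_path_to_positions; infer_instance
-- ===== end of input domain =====

-- B replaces A's imperative loop with a filter-to-deltas pass followed by a recursive prefix-scan (alternative decomposition, same cost).


-- ===== PORT A =====
def DIRECTIONS : PySem.Dict String (Int × Int) :=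
  PySem.Dict.ofList [("North", (-1, 0)), ("South", (1, 0)), ("East", (0, 1)), ("West", (0, -1))]

def path_to_positions (start : Int × Int) (path : List String) : List (Int × Int) :=
  (path.foldl
    (fun (st : List (Int × Int) × (Int × Int)) direction =>
      if DIRECTIONS.contains direction then
        match DIRECTIONS.getD direction (0, 0) with
        | (dr, dc) =>
          let current := (st.2.1 + dr, st.2.2 + dc)
          (st.1 ++ [current], current)
      else st)
    ([start], start)).1

-- ===== PORT B =====
-- _scan from Source B: recursive prefix-scan
def pvScan : (Int × Int) → List (Int × Int) → List (Int × Int)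
  | pos, [] => [pos]
  | pos, (dr, dc) :: rest => [pos] ++ pvScan (pos.1 + dr, pos.2 + dc) rest

def path_to_positions_alt (start : Int × Int) (path : List String) : List (Int × Int) :=
  let deltas := (path.filter (fun d => DIRECTIONS.contains d)).map (fun d => DIRECTIONS.getD d (0, 0))
  pvScan start deltas

-- ===== PRECONDITION & SPEC =====
def Spec_path_to_positions (start : Int × Int) (path : List String) (out : List (Int × Int)) : Prop := out = path_to_positions_alt start path
instance (start : Int × Int) (path : List String) (out : List (Int × Int)) : Decidable (Spec_path_to_positions start path out) := by unfold Spec_path_to_positions; infer_instance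

-- ===== CLAIM (what is proved, stated in full; the proofs are below) =====
def Claim_equal_path_to_positions : Prop := ∀ (start : Int × Int) (path : List String), Dom_path_to_positions start path → Spec_path_to_positions start path (path_to_positions start path)

-- ===== LEMMAS AND PROOFS =====
theorem pv_fold_scan (path : List String) (acc : List (Int × Int)) (cur : Int × Int) :
    (path.foldl
      (fun (st : List (Int × Int) × (Int × Int)) direction =>
        if DIRECTIONS.contains direction then
          match DIRECTIONS.getD direction (0, 0) with
          | (dr, dc) =>
            let current := (st.2.1 + dr, st.2.2 + dc)
            (st.1 ++ [current], current)
        else st)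
      (acc ++ [cur], cur)).1
    = acc ++ pvScan cur ((path.filter (fun d => DIRECTIONS.contains d)).map (fun d => DIRECTIONS.getD d (0, 0))) := by
  induction path generalizing acc cur with
  | nil => simp [pvScan]
  | cons d rest ih =>
    rcases hv : DIRECTIONS.getD d (0, 0) with ⟨dr, dc⟩
    by_cases h : DIRECTIONS.contains d
    · have key := ih (acc ++ [cur]) (cur.1 + dr, cur.2 + dc)
      simp only [List.append_assoc, List.singleton_append] at key
      simp [h, hv, pvScan, key]
    · simp [h, ih]

theorem path_to_positions_eq (start : Int × Int) (path : List String) :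
    path_to_positions start path = path_to_positions_alt start path := by
  have := pv_fold_scan path [] start
  simpa [path_to_positions, path_to_positions_alt] using this

-- ===== VERDICT (by name: the statement is the Claim_ definition above) =====
theorem path_to_positions_spec : Claim_equal_path_to_positions := by
  intro start path _
  exact path_to_positions_eq start path
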